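-- pv_equiv track=rewrite | github.com/padaher93/agent-app | src/agent_app_dataset/reporting_obligation_candidates.py | summarize_candidate_states
-- ===== SOURCE A (Python) =====
-- from typing import Any
--
-- def _normalize_text(value: Any) -> str:
--     return str(value or "").strip()
--
-- def summarize_candidate_states(candidates: list[dict[str, Any]]) -> dict[str, int]:
--     summary = {
--         "total": 0,
--         "grounded": 0,
--         "ambiguous": 0,
--         "unsupported": 0,
--         "promoted": 0,
--     }
--     for row in candidates:
--         if not isinstance(row, dict):
--             continue
--         summary["total"] += 1
--         state = _normalize_text(row.get("grounding_state")).lower()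
--         if state in {"grounded", "ambiguous", "unsupported"}:
--             summary[state] += 1
--         if _normalize_text(row.get("promoted_obligation_id")):
--             summary["promoted"] += 1
--     return summary
-- ===== SOURCE B (Python) =====
-- from typing import Any
--
-- def _normalize_text(value: Any) -> str:
--     return str(value or "").strip()
--
-- def summarize_candidate_states(candidates: list[dict[str, Any]]) -> dict[str, int]:
--     rows = [r for r in candidates if isinstance(r, dict)]
--     states: dict[str, int] = {}
--     for r in rows:
--         k = _normalize_text(r.get("grounding_state")).lower()
--         states[k] = states.get(k, 0) + 1
--     return {
--         "total": len(rows),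
--         "grounded": states.get("grounded", 0),
--         "ambiguous": states.get("ambiguous", 0),
--         "unsupported": states.get("unsupported", 0),
--         "promoted": sum(1 for r in rows if _normalize_text(r.get("promoted_obligation_id"))),
--     }
-- ===== Notes on version B (the rewrite author's own statement) =====
-- stated objective: simpler
-- what changed: A's single fused loop mutating a five-key summary dict is replaced by building a state counter over the rows once and then assembling the result dict explicitly from reads of that counter, len(rows) and a separate promoted sum.
import Mathlib
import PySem

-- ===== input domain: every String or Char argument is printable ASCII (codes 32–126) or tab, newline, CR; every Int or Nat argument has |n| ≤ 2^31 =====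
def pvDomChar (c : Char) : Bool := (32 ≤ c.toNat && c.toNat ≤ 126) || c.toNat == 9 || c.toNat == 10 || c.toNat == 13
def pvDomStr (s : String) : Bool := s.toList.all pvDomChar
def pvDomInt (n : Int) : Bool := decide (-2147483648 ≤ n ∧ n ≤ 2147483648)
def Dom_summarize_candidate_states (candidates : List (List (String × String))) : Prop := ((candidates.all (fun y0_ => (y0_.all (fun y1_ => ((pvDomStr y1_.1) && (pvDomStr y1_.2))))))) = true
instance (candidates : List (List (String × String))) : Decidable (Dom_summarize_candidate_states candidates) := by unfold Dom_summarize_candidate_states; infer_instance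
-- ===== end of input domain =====

-- ===== PORT A =====
-- B replaces A's fused per-row dict mutation by a counter build plus explicit assembly (objective: simpler).
-- str(value or "").strip() on an optional string value (missing key -> None)
def pyNorm (o : Option String) : String := PySem.Str.strip (o.getD "")

def summarize_candidate_states (candidates : List (List (String × String))) : List (String × Int) :=
  let summary : PySem.Dict String Int :=
    PySem.Dict.mk [("total", 0), ("grounded", 0), ("ambiguous", 0), ("unsupported", 0), ("promoted", 0)]
  let summary := candidates.foldl (fun s row =>
    -- 'if not isinstance(row, dict): continue' — every row has dict type here, so the guard never fires
    let s := s.insert "total" (s.getD "total" 0 + 1)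
    let state := PySem.Str.lower (pyNorm ((PySem.Dict.mk row).get? "grounding_state"))
    let s := if state = "grounded" ∨ state = "ambiguous" ∨ state = "unsupported"
             then s.insert state (s.getD state 0 + 1) else s
    if pyNorm ((PySem.Dict.mk row).get? "promoted_obligation_id") ≠ ""
    then s.insert "promoted" (s.getD "promoted" 0 + 1) else s) summary
  summary.items

-- ===== PORT B =====
def summarize_candidate_states_alt (candidates : List (List (String × String))) : List (String × Int) :=
  -- rows = [r for r in candidates if isinstance(r, dict)]: the type guarantees every r is a dict
  let rows := candidates
  let states : PySem.Dict String Int := rows.foldl (fun d r =>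
    let k := PySem.Str.lower (pyNorm ((PySem.Dict.mk r).get? "grounding_state"))
    d.insert k (d.getD k 0 + 1)) PySem.Dict.empty
  [("total", (rows.length : Int)),
   ("grounded", states.getD "grounded" 0),
   ("ambiguous", states.getD "ambiguous" 0),
   ("unsupported", states.getD "unsupported" 0),
   ("promoted", rows.foldl (fun acc r =>
      if pyNorm ((PySem.Dict.mk r).get? "promoted_obligation_id") ≠ "" then acc + 1 else acc) 0)]

-- ===== PRECONDITION & SPEC =====
def Spec_summarize_candidate_states (candidates : List (List (String × String))) (out : List (String × Int)) : Prop := out = summarize_candidate_states_alt candidates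
instance (candidates : List (List (String × String))) (out : List (String × Int)) : Decidable (Spec_summarize_candidate_states candidates out) := by unfold Spec_summarize_candidate_states; infer_instance

-- ===== CLAIM (what is proved, stated in full; the proofs are below) =====
def Claim_equal_summarize_candidate_states : Prop := ∀ (candidates : List (List (String × String))), Dom_summarize_candidate_states candidates → Spec_summarize_candidate_states candidates (summarize_candidate_states candidates)

-- ===== LEMMAS AND PROOFS =====
def stateOf (row : List (String × String)) : String :=
  PySem.Str.lower (pyNorm ((PySem.Dict.mk row).get? "grounding_state"))

def isPromoted (row : List (String × String)) : Bool :=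
  decide (pyNorm ((PySem.Dict.mk row).get? "promoted_obligation_id") ≠ "")

lemma stepDict (x : String) (c : Prop) [Decidable c] (t g am u p : Int) :
    (let s : PySem.Dict String Int :=
        PySem.Dict.mk [("total", t), ("grounded", g), ("ambiguous", am), ("unsupported", u), ("promoted", p)]
     let s := s.insert "total" (s.getD "total" 0 + 1)
     let s := if x = "grounded" ∨ x = "ambiguous" ∨ x = "unsupported"
              then s.insert x (s.getD x 0 + 1) else s
     if c then s.insert "promoted" (s.getD "promoted" 0 + 1) else s)
    = PySem.Dict.mk [("total", t + 1),
        ("grounded", if x = "grounded" then g + 1 else g),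
        ("ambiguous", if x = "ambiguous" then am + 1 else am),
        ("unsupported", if x = "unsupported" then u + 1 else u),
        ("promoted", if c then p + 1 else p)] := by
  by_cases h1 : x = "grounded"
  · subst h1
    by_cases hc : c <;> simp [hc, PySem.Dict.insert, PySem.Dict.getD, PySem.Dict.get?]
  · by_cases h2 : x = "ambiguous"
    · subst h2
      by_cases hc : c <;> simp [hc, PySem.Dict.insert, PySem.Dict.getD, PySem.Dict.get?]
    · by_cases h3 : x = "unsupported"
      · subst h3
        by_cases hc : c <;> simp [hc, PySem.Dict.insert, PySem.Dict.getD, PySem.Dict.get?]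
      · by_cases hc : c <;>
          simp [hc, h1, h2, h3, PySem.Dict.insert, PySem.Dict.getD, PySem.Dict.get?]

lemma foldA_inv (l : List (List (String × String))) (t g am u p : Int) :
    l.foldl (fun s row =>
      let s := s.insert "total" (s.getD "total" 0 + 1)
      let state := PySem.Str.lower (pyNorm ((PySem.Dict.mk row).get? "grounding_state"))
      let s := if state = "grounded" ∨ state = "ambiguous" ∨ state = "unsupported"
               then s.insert state (s.getD state 0 + 1) else s
      if pyNorm ((PySem.Dict.mk row).get? "promoted_obligation_id") ≠ ""
      then s.insert "promoted" (s.getD "promoted" 0 + 1) else s)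
      (PySem.Dict.mk [("total", t), ("grounded", g), ("ambiguous", am), ("unsupported", u), ("promoted", p)])
    = PySem.Dict.mk [("total", t + l.length),
        ("grounded", g + ((l.map stateOf).count "grounded" : Int)),
        ("ambiguous", am + ((l.map stateOf).count "ambiguous" : Int)),
        ("unsupported", u + ((l.map stateOf).count "unsupported" : Int)),
        ("promoted", p + (l.countP isPromoted : Int))] := by
  induction l generalizing t g am u p with
  | nil => simp
  | cons r l ih =>
    rw [List.foldl_cons,
        show (let s := (PySem.Dict.mk [("total", t), ("grounded", g), ("ambiguous", am), ("unsupported", u), ("promoted", p)]).insert "total"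
                 ((PySem.Dict.mk [("total", t), ("grounded", g), ("ambiguous", am), ("unsupported", u), ("promoted", p)]).getD "total" 0 + 1)
              let state := PySem.Str.lower (pyNorm ((PySem.Dict.mk r).get? "grounding_state"))
              let s := if state = "grounded" ∨ state = "ambiguous" ∨ state = "unsupported"
                       then s.insert state (s.getD state 0 + 1) else s
              if pyNorm ((PySem.Dict.mk r).get? "promoted_obligation_id") ≠ ""
              then s.insert "promoted" (s.getD "promoted" 0 + 1) else s)
            = PySem.Dict.mk [("total", t + 1),
                ("grounded", if stateOf r = "grounded" then g + 1 else g),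
                ("ambiguous", if stateOf r = "ambiguous" then am + 1 else am),
                ("unsupported", if stateOf r = "unsupported" then u + 1 else u),
                ("promoted", if pyNorm ((PySem.Dict.mk r).get? "promoted_obligation_id") ≠ "" then p + 1 else p)]
        from stepDict (stateOf r) _ t g am u p,
        ih]
    simp only [PySem.Dict.mk.injEq, List.cons.injEq, Prod.mk.injEq, List.map_cons,
      List.count_cons, List.countP_cons, List.length_cons, isPromoted, beq_iff_eq, decide_eq_true_eq]
    refine ⟨⟨trivial, by push_cast; ring⟩, ⟨trivial, ?_⟩, ⟨trivial, ?_⟩, ⟨trivial, ?_⟩, ⟨trivial, ?_⟩, trivial⟩ <;>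
      split_ifs <;> push_cast <;> ring

theorem summarize_candidate_states_spec : Claim_equal_summarize_candidate_states := by
  intro candidates _
  show summarize_candidate_states candidates = summarize_candidate_states_alt candidates
  simp only [summarize_candidate_states, summarize_candidate_states_alt]
  rw [foldA_inv]
  have hcnt : candidates.foldl (fun (d : PySem.Dict String Int) r =>
        d.insert (PySem.Str.lower (pyNorm ((PySem.Dict.mk r).get? "grounding_state")))
          (d.getD (PySem.Str.lower (pyNorm ((PySem.Dict.mk r).get? "grounding_state"))) 0 + 1))
        PySem.Dict.empty
      = PySem.Dict.counter (candidates.map stateOf) := by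
    rw [show candidates.foldl (fun (d : PySem.Dict String Int) r =>
          d.insert (PySem.Str.lower (pyNorm ((PySem.Dict.mk r).get? "grounding_state")))
            (d.getD (PySem.Str.lower (pyNorm ((PySem.Dict.mk r).get? "grounding_state"))) 0 + 1))
          PySem.Dict.empty
        = (candidates.map stateOf).foldl (fun (d : PySem.Dict String Int) x =>
            d.insert x (d.getD x 0 + 1)) PySem.Dict.empty
        from (List.foldl_map (f := stateOf) (g := fun (d : PySem.Dict String Int) x => d.insert x (d.getD x 0 + 1))).symm]
    exact PySem.Dict.foldl_insert_getD_add_one_eq_counter (candidates.map stateOf)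
  simp only [hcnt, PySem.Dict.getD_counter, PySem.List.foldl_ite_add_one]
  have hprom : List.countP isPromoted candidates
      = List.countP (fun x => !decide (pyNorm ((PySem.Dict.mk x).get? "promoted_obligation_id") = "")) candidates :=
    List.countP_congr (fun x _ => by simp [isPromoted])
  simp [hprom]
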